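-- pv_equiv track=rewrite | github.com/Zem-0/LeetCode_daily | good_subarrays.py | countGood
-- ===== SOURCE A (Python) =====
-- from typing import List
--
-- def countGood(nums: List[int], k: int) -> int:
--     l = 0
--     r = 0
--     cnt = 0
--     pair = 0
--     n = len(nums)
--     d = {}
--     while r < n:
--         pair += d.get(nums[r], 0)
--         d[nums[r]] = d.get(nums[r], 0) + 1
--         while pair >= k:
--             cnt += n - r
--             d[nums[l]] -= 1
--             pair -= d[nums[l]]
--             l += 1
--         r += 1
--     return cnt
-- ===== SOURCE B (Python) =====
-- from typing import List
--
-- def countGood(nums: List[int], k: int) -> int: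
--     # For each start index l, scan right with a fresh counter until the window
--     # reaches k equal pairs; every further extension is good, so add n - r and stop.
--     n = len(nums)
--     ans = 0
--     for l in range(n):
--         seen = {}
--         pair = 0
--         for r in range(l, n):
--             x = nums[r]
--             c = seen.get(x, 0)
--             pair += c
--             seen[x] = c + 1
--             if pair >= k:
--                 ans += n - r
--                 break
--     return ans
-- ===== Notes on version B (the rewrite author's own statement) =====
-- stated objective: simpler
-- what changed: B drops A's amortized sliding window (shared dict, pair decrements, cnt += n-r inside the shrink loop) and instead, for each start index l, runs a fresh forward scan with its own counter until the window first reaches k equal pairs, adding n - r and breaking; Pre_ excludes nums != [] with k <= 0, where A raises IndexError/KeyError in its shrink loop.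
import Mathlib
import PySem

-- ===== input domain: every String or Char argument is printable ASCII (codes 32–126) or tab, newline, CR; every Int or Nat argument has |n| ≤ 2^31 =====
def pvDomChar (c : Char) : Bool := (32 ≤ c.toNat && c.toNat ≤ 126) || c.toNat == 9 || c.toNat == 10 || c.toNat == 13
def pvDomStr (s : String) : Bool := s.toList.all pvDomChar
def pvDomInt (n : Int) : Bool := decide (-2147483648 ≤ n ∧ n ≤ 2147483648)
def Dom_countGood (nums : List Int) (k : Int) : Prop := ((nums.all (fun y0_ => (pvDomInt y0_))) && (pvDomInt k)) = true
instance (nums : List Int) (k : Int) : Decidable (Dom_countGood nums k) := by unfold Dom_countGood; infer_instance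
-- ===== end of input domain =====

-- B replaces A's amortized sliding window (shared dict, pair decrements, cnt += n-r inside the
-- shrink loop) by an independent forward scan per start index l with a fresh counter, stopping
-- at the first right end r whose window reaches k equal pairs and adding n - r (objective: simpler).

-- ===== PORT A =====
-- inner `while pair >= k` of A; fuel and the `none` branches (Python's IndexError/KeyError
-- on nums[l] / d[nums[l]], reached only when k ≤ 0 and nums ≠ []) only make the recursion
-- total — inside Pre_ they are never hit.
def innerA (nums : List Int) (k n r : Int) :
    Nat → Int → PySem.Dict Int Int → Int → Int → Int × PySem.Dict Int Int × Int × Int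
  | 0, l, d, pair, cnt => (l, d, pair, cnt)
  | fuel+1, l, d, pair, cnt =>
    if k ≤ pair then
      match PySem.List.pyGet? nums l with
      | none => (l, d, pair, cnt)
      | some x =>
        match d.get? x with
        | none => (l, d, pair, cnt)
        | some v =>
          innerA nums k n r fuel (l+1) (d.insert x (v-1)) (pair - (v-1)) (cnt + (n - r))
    else (l, d, pair, cnt)

-- outer `while r < n` of A, as structural recursion over the suffix of nums starting at r
def loopA (nums : List Int) (k n : Int) :
    List Int → Int → Int → PySem.Dict Int Int → Int → Int → Int
  | [], _r, _l, _d, _pair, cnt => cnt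
  | x :: rest, r, l, d, pair, cnt =>
    let pair1 := pair + d.getD x 0
    let d1 := d.insert x (d.getD x 0 + 1)
    match innerA nums k n r (nums.length + 1) l d1 pair1 cnt with
    | (l2, d2, pair2, cnt2) => loopA nums k n rest (r+1) l2 d2 pair2 cnt2

def countGood (nums : List Int) (k : Int) : Int :=
  loopA nums k (PySem.List.len nums) nums 0 0 PySem.Dict.empty 0 0

-- ===== PORT B =====
-- B's inner `for r in range(l, n)` with break: scan the suffix, fresh dict, stop at pair >= k
def innerScanB (k n : Int) : List Int → Int → PySem.Dict Int Int → Int → Int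
  | [], _r, _d, _pair => 0
  | x :: rest, r, d, pair =>
    let c := d.getD x 0
    let pair1 := pair + c
    if k ≤ pair1 then n - r
    else innerScanB k n rest (r+1) (d.insert x (c+1)) pair1

-- B's outer `for l in range(n)` accumulating ans
def outerB (k n : Int) : List Int → Int → Int → Int
  | [], _l, ans => ans
  | x :: rest, l, ans =>
    outerB k n rest (l+1) (ans + innerScanB k n (x :: rest) l PySem.Dict.empty 0)

def countGood_alt (nums : List Int) (k : Int) : Int :=
  outerB k (PySem.List.len nums) nums 0 0

-- ===== PRECONDITION & SPEC =====
-- Pre_ excludes exactly the inputs on which the Python A raises (IndexError/KeyError in the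
-- shrink loop: k ≤ 0 with a nonempty list); A returns normally everywhere else.
def Pre_countGood (nums : List Int) (k : Int) : Prop := nums = [] ∨ 1 ≤ k
instance (nums : List Int) (k : Int) : Decidable (Pre_countGood nums k) := by unfold Pre_countGood; infer_instance
def pvWitness_countGood : List Int × Int := ([1, 1, 2], 2)

def Spec_countGood (nums : List Int) (k : Int) (out : Int) : Prop := out = countGood_alt nums k
instance (nums : List Int) (k : Int) (out : Int) : Decidable (Spec_countGood nums k out) := by unfold Spec_countGood; infer_instance

-- ===== CLAIM (what is proved, stated in full; the proofs are below) =====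
def Claim_equal_countGood : Prop := ∀ (nums : List Int) (k : Int), Dom_countGood nums k → Pre_countGood nums k → Spec_countGood nums k (countGood nums k)

-- ===== LEMMAS AND PROOFS =====

-- pair count of a window, peeled from the front: pc (x :: w) counts x's mates in w plus pc w
def pc : List Int → Int
  | [] => 0
  | x :: w => (w.count x : Int) + pc w

theorem pc_append_singleton : ∀ (w : List Int) (x : Int), pc (w ++ [x]) = pc w + (w.count x : Int) := by
  intro w x
  induction w with
  | nil => simp [pc]
  | cons y w ih =>
    simp only [List.cons_append, pc, List.count_append, ih]
    by_cases h : x = y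
    · subst h; simp; ring
    · simp [h, Ne.symm h]; ring

theorem pc_tail_le (x : Int) (w : List Int) : pc w ≤ pc (x :: w) := by
  simp only [pc]
  have h := Int.natCast_nonneg (w.count x)
  linarith

-- ghost-window abstraction of A: the dict/pair state replaced by the window list itself
def absInner (k n r : Int) : List Int → Int → List Int × Int
  | [], cnt => ([], cnt)
  | x :: w, cnt =>
    if k ≤ pc (x :: w) then absInner k n r w (cnt + (n - r)) else (x :: w, cnt)

def absLoop (k n : Int) : List Int → Int → List Int → Int → Int
  | [], _r, _w, cnt => cnt
  | x :: rest, r, w, cnt =>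
    match absInner k n r (w ++ [x]) cnt with
    | (w2, cnt2) => absLoop k n rest (r+1) w2 cnt2

-- ghost-prefix abstraction of B's inner scan
def babs (k n : Int) : List Int → Int → List Int → Int
  | [], _r, _p => 0
  | x :: s, r, p => if k ≤ pc (p ++ [x]) then n - r else babs k n s (r+1) (p ++ [x])

def bouter (k n : Int) : List Int → Int → Int
  | [], _l => 0
  | x :: rest, l => babs k n (x :: rest) l [] + bouter k n rest (l+1)

-- the pending contributions: resumed scans for every suffix window plus future fresh scans
def pend (k n : Int) : List Int → Int → List Int → Int
  | [], r, rest => bouter k n rest r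
  | x :: w, r, rest => babs k n rest r (x :: w) + pend k n w r rest

-- one processing step of a pending window at position r, facing tail `rest`
def sstep (k n r : Int) (rest : List Int) (v : List Int) : Int :=
  if k ≤ pc v then n - r else babs k n rest (r+1) v

def ssum (k n r : Int) (rest : List Int) : List Int → Int
  | [] => 0
  | y :: u => sstep k n r rest (y :: u) + ssum k n r rest u

-- dict-window invariant shared by both bridges
def DInv (d : PySem.Dict Int Int) (w : List Int) : Prop :=
  ∀ x : Int, d.getD x 0 = (w.count x : Int) ∧ (0 < w.count x → d.get? x = some ((w.count x : Int)))

theorem DInv_empty : DInv PySem.Dict.empty [] := by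
  intro x; simp [PySem.Dict.getD_empty, PySem.Dict.get?_empty]

theorem DInv_push {d : PySem.Dict Int Int} {w : List Int} (h : DInv d w) (x : Int) :
    DInv (d.insert x (d.getD x 0 + 1)) (w ++ [x]) := by
  intro y
  have hy := h y
  rw [PySem.Dict.getD_insert, PySem.Dict.get?_insert]
  by_cases hyx : y = x
  · subst hyx
    refine ⟨?_, fun _ => ?_⟩ <;> simp [List.count_append, hy.1]
  · have hcnt : (w ++ [x]).count y = w.count y := by
      simp [List.count_append,
        show ¬x = y from fun hh => hyx hh.symm]
    rw [hcnt]
    exact ⟨by simp [hyx, hy.1], fun hpos => by simpa [hyx] using hy.2 hpos⟩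

theorem DInv_pop {d : PySem.Dict Int Int} {x : Int} {w : List Int} (h : DInv d (x :: w)) :
    DInv (d.insert x ((((x :: w).count x : Int)) - 1)) w := by
  intro y
  have hy := h y
  have hcx : (x :: w).count x = w.count x + 1 := by simp
  rw [PySem.Dict.getD_insert, PySem.Dict.get?_insert]
  by_cases hyx : y = x
  · subst hyx
    refine ⟨?_, fun _ => ?_⟩ <;> simp [hcx]
  · have hcy : (x :: w).count y = w.count y := by
      simp [show ¬x = y from fun hh => hyx hh.symm]
    refine ⟨by rw [if_neg hyx, hy.1, hcy], fun hpos => ?_⟩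
    rw [if_neg hyx]
    have := hy.2 (by omega : 0 < (x :: w).count y)
    rwa [hcy] at this

-- helper: nums.drop l.toNat = y :: t → nums[l] is y
theorem pyGet?_of_drop {nums : List Int} {l : Int} {y : Int} {t : List Int}
    (hl : 0 ≤ l) (h : nums.drop l.toNat = y :: t) : PySem.List.pyGet? nums l = some y := by
  have hlen : l.toNat < nums.length := by
    by_contra hc
    rw [List.drop_eq_nil_of_le (by omega)] at h
    simp at h
  have hidx : nums[l.toNat]? = some y := by
    rw [← List.head?_drop, h, List.head?_cons]
  simp only [PySem.List.pyGet?, PySem.List.pyIdx?]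
  split
  · simpa [show l < (nums.length : Int) from by omega] using hidx
  · omega

-- (a) characterization of absInner: it drops the j shortest-popped prefixes
theorem absInner_spec (k n r : Int) (hk : 1 ≤ k) :
    ∀ (u : List Int) (cnt : Int), ∃ j : Nat, j ≤ u.length ∧
      absInner k n r u cnt = (u.drop j, cnt + j * (n - r)) ∧
      pc (u.drop j) < k ∧ (∀ i : Nat, i < j → k ≤ pc (u.drop i)) := by
  intro u
  induction u with
  | nil =>
    intro cnt
    refine ⟨0, by simp, by simp [absInner], by simp [pc]; omega, by omega⟩
  | cons x w ih =>
    intro cnt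
    by_cases h : k ≤ pc (x :: w)
    · obtain ⟨j, hj, heq, hlt, hall⟩ := ih (cnt + (n - r))
      refine ⟨j + 1, by simp; omega, ?_, by simpa using hlt, ?_⟩
      · simp only [absInner, if_pos h, List.drop_succ_cons, heq]
        congr 1
        push_cast; ring
      · intro i hi
        cases i with
        | zero => simpa using h
        | succ m => simpa using hall m (by omega)
    · exact ⟨0, by simp, by simp [absInner, if_neg h], by simpa using (by omega : pc (x :: w) < k), by omega⟩

-- (b) the popped suffixes each contribute n - r to the suffix sum
theorem ssum_split (k n r : Int) (rest : List Int) :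
    ∀ (j : Nat) (u : List Int), j ≤ u.length → (∀ i : Nat, i < j → k ≤ pc (u.drop i)) →
      ssum k n r rest u = j * (n - r) + ssum k n r rest (u.drop j) := by
  intro j
  induction j with
  | zero => intro u _ _; simp
  | succ m ih =>
    intro u hlen hall
    cases u with
    | nil => simp at hlen
    | cons y u' =>
      have h0 : k ≤ pc (y :: u') := by simpa using hall 0 (by omega)
      have hrec := ih u' (by simpa using hlen) (fun i hi => by simpa using hall (i+1) (by omega))
      simp only [ssum, sstep, if_pos h0, List.drop_succ_cons, hrec]
      push_cast; ring

-- (c) once below k, the suffix sum is the pending sum at the next position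
theorem ssum_eq_pend (k n r : Int) (rest : List Int) :
    ∀ (v : List Int), pc v < k →
      ssum k n r rest v + bouter k n rest (r+1) = pend k n v (r+1) rest := by
  intro v
  induction v with
  | nil => intro _; simp [ssum, pend]
  | cons y v' ih =>
    intro hv
    have hv' : pc v' < k := lt_of_le_of_lt (pc_tail_le y v') hv
    simp only [ssum, sstep, if_neg (not_le.2 hv), pend, ← ih hv']
    ring

-- (d) unfolding pend over one more input element
theorem pend_unfold (k n r : Int) (x : Int) (rest : List Int) :
    ∀ (w : List Int), pend k n w r (x :: rest) = ssum k n r rest (w ++ [x]) + bouter k n rest (r+1) := by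
  intro w
  induction w with
  | nil => simp [pend, bouter, babs, ssum, sstep]
  | cons y w' ih =>
    simp only [pend, ih, List.cons_append, ssum]
    have : babs k n (x :: rest) r (y :: w') = sstep k n r rest ((y :: w') ++ [x]) := by
      simp [babs, sstep]
    rw [this]
    simp only [List.cons_append]
    ring

-- (e) no input left: nothing pending
theorem pend_nil (k n r : Int) : ∀ (w : List Int), pend k n w r [] = 0 := by
  intro w
  induction w with
  | nil => simp [pend, bouter]
  | cons y w' ih => simp [pend, babs, ih]

-- (main, abstract) A's loop yields exactly the pending contributions
theorem absMain (k n : Int) (hk : 1 ≤ k) :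
    ∀ (rest : List Int) (r : Int) (w : List Int) (cnt : Int), pc w < k →
      absLoop k n rest r w cnt = cnt + pend k n w r rest := by
  intro rest
  induction rest with
  | nil => intro r w cnt _; simp [absLoop, pend_nil]
  | cons x rest ih =>
    intro r w cnt hw
    obtain ⟨j, hj, heq, hlt, hall⟩ := absInner_spec k n r hk (w ++ [x]) cnt
    simp only [absLoop, heq]
    rw [ih (r+1) ((w ++ [x]).drop j) (cnt + j * (n - r)) hlt]
    rw [pend_unfold, ssum_split k n r rest j (w ++ [x]) hj hall,
        ← ssum_eq_pend k n r rest ((w ++ [x]).drop j) hlt]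
    ring

-- bridge: A's fueled inner loop simulates absInner under the dict-window invariant
theorem innerA_bridge (nums : List Int) (k n r : Int) (hk : 1 ≤ k) :
    ∀ (u : List Int) (fuel : Nat) (l : Int) (d : PySem.Dict Int Int) (cnt : Int) (rest' : List Int),
      0 ≤ l → nums.drop l.toNat = u ++ rest' → DInv d u → u.length < fuel →
      ∃ d2, innerA nums k n r fuel l d (pc u) cnt =
          (l + ((u.length - (absInner k n r u cnt).1.length : Nat) : Int), d2,
            pc (absInner k n r u cnt).1, (absInner k n r u cnt).2) ∧
        DInv d2 (absInner k n r u cnt).1 ∧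
        ∃ t, u = t ++ (absInner k n r u cnt).1 := by
  intro u
  induction u with
  | nil =>
    intro fuel l d cnt rest' _ _ hinv hfuel
    obtain ⟨fuel, rfl⟩ : ∃ m, fuel = m + 1 := ⟨fuel - 1, by omega⟩
    have hnk : ¬ (k ≤ (0 : Int)) := by omega
    refine ⟨d, ?_, by simpa [absInner] using hinv, [], by simp [absInner]⟩
    simp [innerA, absInner, pc, hnk]
  | cons y w ihu =>
    intro fuel l d cnt rest' hl hdrop hinv hfuel
    obtain ⟨fuel, rfl⟩ : ∃ m, fuel = m + 1 := ⟨fuel - 1, by omega⟩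
    by_cases h : k ≤ pc (y :: w)
    · -- pop y
      have hget : PySem.List.pyGet? nums l = some y := pyGet?_of_drop hl hdrop
      have hcnt0 : 0 < (y :: w).count y := by simp
      have hget2 : d.get? y = some (((y :: w).count y : Int)) := (hinv y).2 hcnt0
      have hpair : pc (y :: w) - (((y :: w).count y : Int) - 1) = pc w := by
        simp only [pc, List.count_cons, BEq.rfl]
        push_cast; ring_nf
      have hinv' : DInv (d.insert y ((((y :: w).count y : Int)) - 1)) w := DInv_pop hinv
      have hdrop' : nums.drop (l + 1).toNat = w ++ rest' := by
        have h1 : (l + 1).toNat = l.toNat + 1 := by omega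
        have h2 := congrArg List.tail hdrop
        rw [List.tail_drop] at h2
        simpa [h1] using h2
      obtain ⟨d2, heq, hinv2, t, ht⟩ :=
        ihu fuel (l + 1) (d.insert y ((((y :: w).count y : Int)) - 1)) (cnt + (n - r)) rest'
          (by omega) hdrop' hinv' (by simp only [List.length_cons] at hfuel; omega)
      refine ⟨d2, ?_, ?_, y :: t, by simp only [absInner, if_pos h, List.cons_append]; rw [← ht]⟩
      · simp only [innerA, if_pos h, hget, hget2]
        rw [hpair, heq]
        simp only [absInner, if_pos h, List.length_cons]
        have hlen2 := congrArg List.length ht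
        simp only [List.length_append] at hlen2
        have h1 : l + 1 + ((w.length - (absInner k n r w (cnt + (n - r))).1.length : Nat) : Int)
            = l + ((w.length + 1 - (absInner k n r w (cnt + (n - r))).1.length : Nat) : Int) := by
          omega
        rw [h1]
      · simpa [absInner, if_pos h] using hinv2
    · refine ⟨d, ?_, by simpa [absInner, if_neg h] using hinv, [], by simp [absInner, if_neg h]⟩
      simp [innerA, absInner, if_neg h]

-- bridge: A's outer loop simulates absLoop
theorem loopA_bridge (nums : List Int) (k n : Int) (hk : 1 ≤ k) :
    ∀ (rest : List Int) (r l : Int) (d : PySem.Dict Int Int) (cnt : Int) (w : List Int),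
      0 ≤ l → nums.drop l.toNat = w ++ rest → DInv d w →
      loopA nums k n rest r l d (pc w) cnt = absLoop k n rest r w cnt := by
  intro rest
  induction rest with
  | nil => intro r l d cnt w _ _ _; simp [loopA, absLoop]
  | cons x rest ih =>
    intro r l d cnt w hl hdrop hinv
    have hgx : d.getD x 0 = (w.count x : Int) := (hinv x).1
    have hinv1 : DInv (d.insert x (d.getD x 0 + 1)) (w ++ [x]) := DInv_push hinv x
    have hdrop1 : nums.drop l.toNat = (w ++ [x]) ++ (x :: rest).tail := by
      simpa [List.append_assoc] using hdrop
    have hfuel : (w ++ [x]).length < nums.length + 1 := by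
      have := congrArg List.length hdrop
      have h2 : (nums.drop l.toNat).length ≤ nums.length := by simp
      simp at this ⊢
      omega
    obtain ⟨d2, heq, hinv2, t, ht⟩ :=
      innerA_bridge nums k n r hk (w ++ [x]) (nums.length + 1) l (d.insert x (d.getD x 0 + 1))
        cnt rest hl (by simpa using hdrop1) hinv1 hfuel
    rw [hgx] at heq
    simp only [loopA]
    rw [hgx, ← pc_append_singleton, heq]
    set w2 := (absInner k n r (w ++ [x]) cnt).1 with hw2
    have hlen : (l + ((w ++ [x]).length - w2.length : Nat)).toNat = l.toNat + t.length := by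
      have hlen2 : (w ++ [x]).length = t.length + w2.length := by rw [ht]; simp
      omega
    have hdrop2 : nums.drop (l + ((w ++ [x]).length - w2.length : Nat)).toNat = w2 ++ rest := by
      rw [hlen, ← List.drop_drop, hdrop1]
      simp only [List.tail_cons]
      rw [ht, List.append_assoc, List.drop_left]
    rw [ih (r+1) _ d2 _ w2 (by omega) hdrop2 hinv2]
    simp only [absLoop]
    rw [hw2]

-- bridge: B's inner scan simulates babs
theorem innerB_bridge (k n : Int) :
    ∀ (s : List Int) (r : Int) (d : PySem.Dict Int Int) (p : List Int),
      DInv d p → innerScanB k n s r d (pc p) = babs k n s r p := by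
  intro s
  induction s with
  | nil => intro r d p _; simp [innerScanB, babs]
  | cons x s ih =>
    intro r d p hinv
    have hg : d.getD x 0 = (p.count x : Int) := (hinv x).1
    simp only [innerScanB, babs, hg, ← pc_append_singleton]
    split
    · rfl
    · have := ih (r+1) (d.insert x ((p.count x : Int) + 1)) (p ++ [x]) (by
        have := DInv_push hinv x
        rwa [hg] at this)
      exact this

-- bridge: B's outer loop accumulates bouter
theorem outerB_bridge (k n : Int) :
    ∀ (rest : List Int) (l ans : Int), outerB k n rest l ans = ans + bouter k n rest l := by
  intro rest
  induction rest with
  | nil => intro l ans; simp [outerB, bouter]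
  | cons x rest ih =>
    intro l ans
    have hscan : innerScanB k n (x :: rest) l PySem.Dict.empty 0 = babs k n (x :: rest) l [] := by
      have := innerB_bridge k n (x :: rest) l PySem.Dict.empty [] DInv_empty
      simpa [pc] using this
    simp only [outerB, bouter, ih, hscan]
    ring

-- ===== VERDICT (by name: the statement is the Claim_ definition above) =====
theorem countGood_spec : Claim_equal_countGood := by
  intro nums k _ hpre
  unfold Spec_countGood countGood countGood_alt
  rcases hpre with hnil | hk
  · subst hnil
    simp [loopA, outerB]
  · have hA : loopA nums k (PySem.List.len nums) nums 0 0 PySem.Dict.empty 0 0 =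
        absLoop k (PySem.List.len nums) nums 0 [] 0 := by
      have := loopA_bridge nums k (PySem.List.len nums) hk nums 0 0 PySem.Dict.empty 0 []
        (by omega) (by simp) DInv_empty
      simpa [pc] using this
    have hB : outerB k (PySem.List.len nums) nums 0 0 =
        bouter k (PySem.List.len nums) nums 0 := by
      simpa using outerB_bridge k (PySem.List.len nums) nums 0 0
    rw [hA, hB, absMain k (PySem.List.len nums) hk nums 0 [] 0 (by have h0 : pc [] = 0 := rfl; omega)]
    simp [pend]
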